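-- pv_equiv track=rewrite | github.com/gozdur/python | 20_translator.py | translate_function
-- ===== SOURCE A (Python) =====
-- def translate_function(value):
--     translation = ""
--     for letter_var in value:
--         if letter_var in "AEIOUaeiou":   # This checks both lower and upper case to make more efficient we could use letter_var.lower() and specify unly aeiou
--             if letter_var.isupper():
--                 translation = translation + "G"
--             else:
--                 translation = translation + "g"
--         else:
--             translation = translation + letter_var
--     return translation
-- ===== SOURCE B (Python) =====
-- _TABLE = str.maketrans("AEIOUaeiou", "GGGGGggggg")
--
-- def translate_function(value):
--     return value.translate(_TABLE)
-- ===== Notes on version B (the rewrite author's own statement) =====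
-- stated objective: idiomatic
-- what changed: Replaces the per-character loop with membership test and case branch by a precomputed translation table (str.maketrans) applied in one library call to value.translate.
import Mathlib
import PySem

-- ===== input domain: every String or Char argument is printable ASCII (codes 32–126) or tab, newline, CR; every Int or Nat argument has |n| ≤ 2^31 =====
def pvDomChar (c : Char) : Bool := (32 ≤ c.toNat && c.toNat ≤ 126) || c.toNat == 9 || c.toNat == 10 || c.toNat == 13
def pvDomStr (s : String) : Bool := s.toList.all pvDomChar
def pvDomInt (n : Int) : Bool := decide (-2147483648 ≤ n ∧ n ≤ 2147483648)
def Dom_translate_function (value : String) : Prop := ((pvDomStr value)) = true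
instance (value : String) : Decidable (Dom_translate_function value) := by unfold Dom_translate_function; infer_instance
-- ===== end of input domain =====

-- B replaces A's per-character membership test and case branch by a precomputed
-- vowel→G/g translation table applied in a single table-driven pass (idiomatic).

-- ===== PORT A =====
-- literal transliteration: accumulate `translation`, appending "G"/"g"/the char
def translate_function (value : String) : String :=
  value.toList.foldl
    (fun translation letter_var =>
      if letter_var ∈ "AEIOUaeiou".toList then
        if letter_var.isUpper then translation ++ "G" else translation ++ "g"
      else translation ++ String.singleton letter_var)
    ""

-- ===== PORT B =====
-- the translation table built by str.maketrans("AEIOUaeiou", "GGGGGggggg")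
def pvTable : PySem.Dict Char Char :=
  PySem.Dict.ofList (List.zip "AEIOUaeiou".toList "GGGGGggggg".toList)

-- value.translate(table): map each character through the table (identity if absent)
def translate_function_alt (value : String) : String :=
  String.ofList (value.toList.map (fun c => pvTable.getD c c))

-- ===== PRECONDITION & SPEC =====
def Spec_translate_function (value : String) (out : String) : Prop := out = translate_function_alt value
instance (value : String) (out : String) : Decidable (Spec_translate_function value out) := by unfold Spec_translate_function; infer_instance

-- ===== CLAIM (what is proved, stated in full; the proofs are below) =====
def Claim_equal_translate_function : Prop := ∀ (value : String), Dom_translate_function value → Spec_translate_function value (translate_function value)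

-- ===== LEMMAS AND PROOFS =====

-- per-character agreement between A's branch and B's table lookup
theorem pv_char_eq (c : Char) :
    (if c ∈ "AEIOUaeiou".toList then
       if c.isUpper then 'G' else 'g'
     else c) = pvTable.getD c c := by
  by_cases h1 : c = 'A'; · subst h1; decide
  by_cases h2 : c = 'E'; · subst h2; decide
  by_cases h3 : c = 'I'; · subst h3; decide
  by_cases h4 : c = 'O'; · subst h4; decide
  by_cases h5 : c = 'U'; · subst h5; decide
  by_cases h6 : c = 'a'; · subst h6; decide
  by_cases h7 : c = 'e'; · subst h7; decide
  by_cases h8 : c = 'i'; · subst h8; decide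
  by_cases h9 : c = 'o'; · subst h9; decide
  by_cases h10 : c = 'u'; · subst h10; decide
  have hL : "AEIOUaeiou".toList = ['A','E','I','O','U','a','e','i','o','u'] := rfl
  have hmem : c ∉ "AEIOUaeiou".toList := by
    rw [hL]; simp [h1, h2, h3, h4, h5, h6, h7, h8, h9, h10]
  rw [if_neg hmem]
  have hT : pvTable = PySem.Dict.mk
      [('A','G'),('E','G'),('I','G'),('O','G'),('U','G'),
       ('a','g'),('e','g'),('i','g'),('o','g'),('u','g')] := by rfl
  rw [hT, PySem.Dict.getD_eq_get?_getD]
  simp [PySem.Dict.get?, Ne.symm h1, Ne.symm h2, Ne.symm h3,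
    Ne.symm h4, Ne.symm h5, Ne.symm h6, Ne.symm h7, Ne.symm h8, Ne.symm h9, Ne.symm h10]

-- A's loop, characterised at the character-list level
theorem pv_fold_eq (l : List Char) (acc : String) :
    (l.foldl
      (fun translation letter_var =>
        if letter_var ∈ "AEIOUaeiou".toList then
          if letter_var.isUpper then translation ++ "G" else translation ++ "g"
        else translation ++ String.singleton letter_var)
      acc).toList = acc.toList ++ l.map (fun c => pvTable.getD c c) := by
  induction l generalizing acc with
  | nil => simp
  | cons c l ih =>
      rw [List.foldl_cons, ih, List.map_cons]
      have hstep :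
          (if c ∈ "AEIOUaeiou".toList then
             if c.isUpper then acc ++ "G" else acc ++ "g"
           else acc ++ String.singleton c).toList = acc.toList ++ [pvTable.getD c c] := by
        rw [← pv_char_eq c]
        split_ifs <;> simp
      rw [hstep, List.append_assoc, List.singleton_append]

-- ===== VERDICT (by name: the statement is the Claim_ definition above) =====
theorem translate_function_spec : Claim_equal_translate_function := by
  intro value _
  show translate_function value = translate_function_alt value
  have h : (translate_function value).toList =
      "".toList ++ value.toList.map (fun c => pvTable.getD c c) :=
    pv_fold_eq value.toList ""
  calc translate_function value
      = String.ofList (translate_function value).toList :=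
        (String.ofList_toList (s := translate_function value)).symm
    _ = translate_function_alt value := by
        rw [h]
        rfl
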